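-- pv_equiv track=rewrite | github.com/lucas-cavalcanti-ads/projetos-fiap | 1ANO/PYTHON/ListaExercicios/Lista09/dominoTDSU.py | jogadaCpu
-- ===== SOURCE A (Python) =====
-- def jogadaCpu(mao, domino, esq, dir):
--     i = 0
--     while i < len(mao):
--         pedra = mao[i]
--         if pedra[0] == esq or pedra[1] == esq:
--             return mao.pop(i)
--         if pedra[0] == dir or pedra[1] == dir:
--             return mao.pop(i)
--         i = i + 1
--         if i == len(mao):
--             mao.append(domino.pop())
-- ===== SOURCE B (Python) =====
-- def jogadaCpu(mao, domino, esq, dir):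
--     # Drawing from the end of the pile until a match is just scanning the
--     # reversed pile after the hand: build that candidate stream once and take
--     # the first stone whose pip set intersects {esq, dir}.  No loops, no
--     # mutation (equivalence is about the return value only).
--     jogaveis = {esq, dir}
--     return next(p for p in mao + domino[::-1] if jogaveis & {p[0], p[1]})
-- ===== Notes on version B (the rewrite author's own statement) =====
-- stated objective: simpler
-- what changed: Replaces A's fused mutating while-loop (manual index, hand grows by popping the pile while being scanned) with a loop-free declarative form: one candidate stream mao + domino[::-1] and next() with a set-intersection match, no mutation.
-- outside the precondition, e.g. on jogadaCpu([], [(1, 2)], 1, 5): A returns None, B returns (1, 2)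
import Mathlib
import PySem

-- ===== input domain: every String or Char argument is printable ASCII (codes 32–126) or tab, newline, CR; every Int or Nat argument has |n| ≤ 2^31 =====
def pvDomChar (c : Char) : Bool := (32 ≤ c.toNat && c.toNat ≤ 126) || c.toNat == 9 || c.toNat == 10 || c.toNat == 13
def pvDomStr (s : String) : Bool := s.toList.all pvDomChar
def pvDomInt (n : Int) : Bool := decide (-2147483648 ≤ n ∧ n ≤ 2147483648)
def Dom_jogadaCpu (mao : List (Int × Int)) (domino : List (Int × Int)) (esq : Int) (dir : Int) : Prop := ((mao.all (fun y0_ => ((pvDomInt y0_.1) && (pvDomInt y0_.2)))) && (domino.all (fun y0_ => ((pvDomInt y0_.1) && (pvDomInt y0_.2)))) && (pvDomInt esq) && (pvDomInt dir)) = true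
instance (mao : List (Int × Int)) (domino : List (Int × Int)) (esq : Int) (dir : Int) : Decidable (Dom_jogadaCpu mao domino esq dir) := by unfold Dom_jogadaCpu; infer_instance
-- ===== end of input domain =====

-- B replaces A's fused mutating while-loop by a loop-free form: one candidate stream
-- mao + domino[::-1] and the first stone whose pip set meets {esq, dir}; equivalence is
-- about the RETURN value only (Python A mutates mao/domino in place, B does not).

-- ===== PORT A =====
-- A's while-loop: state (mao, domino, i); when i reaches len(mao) after a non-match,
-- a stone is popped from the END of domino and appended to mao; (0,0) stands on the two
-- paths Python leaves the Int×Int type (return None on empty hand, IndexError on empty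
-- pile) — both are excluded by Pre_jogadaCpu.
def jogadaCpuLoop (mao : List (Int × Int)) (domino : List (Int × Int)) (esq : Int) (dir : Int) (i : Nat) : Int × Int :=
  if h : i < mao.length then
    let pedra := mao[i]
    if pedra.1 = esq ∨ pedra.2 = esq then pedra
    else if pedra.1 = dir ∨ pedra.2 = dir then pedra
    else
      if hi : i + 1 = mao.length then
        if hdn : domino = [] then (0, 0)   -- domino.pop() raises IndexError; outside Pre_
        else jogadaCpuLoop (mao ++ [domino.getLast hdn]) domino.dropLast esq dir (i + 1)
      else jogadaCpuLoop mao domino esq dir (i + 1)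
  else (0, 0)                 -- while exits: Python returns None; outside Pre_
termination_by (mao.length - i) + domino.length
decreasing_by
  · have hl : 0 < domino.length := List.length_pos_iff.mpr hdn
    simp only [List.length_append, List.length_dropLast, List.length_cons, List.length_nil]
    omega
  · omega

def jogadaCpu (mao : List (Int × Int)) (domino : List (Int × Int)) (esq : Int) (dir : Int) : Int × Int :=
  jogadaCpuLoop mao domino esq dir 0

-- ===== PORT B =====
-- B's match test: 'jogaveis & {p[0], p[1]}' is truthy iff the intersection is non-empty.
def jogaveisMatch (jogaveis : PySem.Set Int) (p : Int × Int) : Bool :=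
  !(PySem.Set.inter jogaveis (PySem.Set.ofList [p.1, p.2])).isEmpty

-- next(p for p in mao + domino[::-1] if …); domino[::-1] is List.reverse
-- (PySem.List.slice?_none_none_neg_one); StopIteration on an empty stream of matches is
-- outside Pre_, marked (0,0).
def jogadaCpu_alt (mao : List (Int × Int)) (domino : List (Int × Int)) (esq : Int) (dir : Int) : Int × Int :=
  let jogaveis : PySem.Set Int := PySem.Set.ofList [esq, dir]
  match (mao ++ domino.reverse).find? (jogaveisMatch jogaveis) with
  | some p => p
  | none => (0, 0)            -- next() raises StopIteration; outside Pre_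

-- ===== PRECONDITION & SPEC =====
-- Pre_ excludes the empty hand, where A returns None (not an Int pair), and the inputs
-- where no stone of the hand or the pile matches esq/dir, where A raises IndexError.
def Pre_jogadaCpu (mao : List (Int × Int)) (domino : List (Int × Int)) (esq : Int) (dir : Int) : Prop :=
  mao ≠ [] ∧ (mao ++ domino).any (fun p => p.1 == esq || p.2 == esq || p.1 == dir || p.2 == dir) = true
instance (mao : List (Int × Int)) (domino : List (Int × Int)) (esq : Int) (dir : Int) : Decidable (Pre_jogadaCpu mao domino esq dir) := by unfold Pre_jogadaCpu; infer_instance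

def pvWitness_jogadaCpu : (List (Int × Int)) × (List (Int × Int)) × Int × Int := ([(1, 2)], [(3, 4)], 1, 5)

def Spec_jogadaCpu (mao : List (Int × Int)) (domino : List (Int × Int)) (esq : Int) (dir : Int) (out : Int × Int) : Prop := out = jogadaCpu_alt mao domino esq dir
instance (mao : List (Int × Int)) (domino : List (Int × Int)) (esq : Int) (dir : Int) (out : Int × Int) : Decidable (Spec_jogadaCpu mao domino esq dir out) := by unfold Spec_jogadaCpu; infer_instance

-- ===== CLAIM (what is proved, stated in full; the proofs are below) =====
def Claim_equal_jogadaCpu : Prop := ∀ (mao : List (Int × Int)) (domino : List (Int × Int)) (esq : Int) (dir : Int), Dom_jogadaCpu mao domino esq dir → Pre_jogadaCpu mao domino esq dir → Spec_jogadaCpu mao domino esq dir (jogadaCpu mao domino esq dir)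

-- ===== LEMMAS AND PROOFS =====

-- B's set-intersection test is exactly A's two stacked equality tests.
theorem jogaveisMatch_iff (esq dir : Int) (p : Int × Int) :
    jogaveisMatch (PySem.Set.ofList [esq, dir]) p = true ↔
      (p.1 = esq ∨ p.2 = esq) ∨ (p.1 = dir ∨ p.2 = dir) := by
  simp [jogaveisMatch, PySem.Set.inter, PySem.Set.ofList, PySem.Set.add, PySem.Set.contains,
        List.filter_eq_nil_iff]
  by_cases h1 : p.1 = esq <;> by_cases h2 : p.2 = esq <;>
    by_cases h3 : p.1 = dir <;> by_cases h4 : p.2 = dir <;>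
      by_cases h5 : dir = esq <;> by_cases h6 : p.2 = p.1 <;>
        simp_all <;> tauto

-- Invariant of A's loop: from position i < len(mao), it returns the first match of the
-- remaining hand followed by the reversed pile (or the (0,0) marker if there is none).
theorem jogadaCpuLoop_eq (n : Nat) (mao domino : List (Int × Int)) (esq dir : Int) (i : Nat)
    (hi : i < mao.length) (hn : (mao.length - i) + domino.length ≤ n) :
    jogadaCpuLoop mao domino esq dir i =
      match ((mao.drop i) ++ domino.reverse).find? (jogaveisMatch (PySem.Set.ofList [esq, dir])) with
      | some p => p
      | none => (0, 0) := by
  induction n generalizing mao domino i with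
  | zero => omega
  | succ n ih =>
    rw [jogadaCpuLoop]
    have hdrop : mao.drop i = mao[i] :: mao.drop (i + 1) := List.drop_eq_getElem_cons hi
    rw [hdrop, List.cons_append, List.find?_cons]
    simp only [dif_pos hi]
    by_cases h1 : mao[i].1 = esq ∨ mao[i].2 = esq
    · have : jogaveisMatch (PySem.Set.ofList [esq, dir]) mao[i] = true :=
        (jogaveisMatch_iff _ _ _).mpr (Or.inl h1)
      simp [h1, this]
    · by_cases h2 : mao[i].1 = dir ∨ mao[i].2 = dir
      · have : jogaveisMatch (PySem.Set.ofList [esq, dir]) mao[i] = true :=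
          (jogaveisMatch_iff _ _ _).mpr (Or.inr h2)
        simp [h1, h2, this]
      · have hm : jogaveisMatch (PySem.Set.ofList [esq, dir]) mao[i] = false := by
          rw [← Bool.not_eq_true, jogaveisMatch_iff]; tauto
        simp only [if_neg h1, if_neg h2, hm]
        by_cases hend : i + 1 = mao.length
        · simp only [dif_pos hend]
          have hdropend : mao.drop (i + 1) = [] := by
            rw [List.drop_eq_nil_iff]; omega
          rw [hdropend]
          by_cases hdn : domino = []
          · subst hdn; simp
          · simp only [dif_neg hdn]
            have hlen : 0 < domino.length := List.length_pos_iff.mpr hdn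
            rw [ih (mao ++ [domino.getLast hdn]) domino.dropLast (i + 1)
                (by simp; omega)
                (by simp only [List.length_append, List.length_dropLast,
                      List.length_cons, List.length_nil]; omega)]
            have hdrop2 : (mao ++ [domino.getLast hdn]).drop (i + 1) = [domino.getLast hdn] := by
              rw [List.drop_append_of_le_length (by omega)]
              simp [hdropend]
            have hrev : domino.reverse = domino.getLast hdn :: domino.dropLast.reverse := by
              conv_lhs => rw [← List.dropLast_append_getLast hdn]
              simp
            rw [hdrop2, hrev]
            simp [List.find?_cons]
        · simp only [dif_neg hend]
          exact ih mao domino (i + 1) (by omega) (by omega)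

-- ===== VERDICT (by name: the statement is the Claim_ definition above) =====
theorem jogadaCpu_spec : Claim_equal_jogadaCpu := by
  intro mao domino esq dir _ hpre
  obtain ⟨hne, _⟩ := hpre
  have h0 : 0 < mao.length := List.length_pos_iff.mpr hne
  unfold Spec_jogadaCpu jogadaCpu jogadaCpu_alt
  rw [jogadaCpuLoop_eq (mao.length + domino.length) mao domino esq dir 0 h0 (by omega)]
  simp
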